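-- pv_equiv track=rewrite | github.com/floriannr24/iRacingRaceStatistics | helpers/diagram.py | extractDrivers
-- ===== SOURCE A (Python) =====
-- def extractDrivers(all_laptimes):
--
--     drivers_comp = []
--     drivers_notcomp = []
--
--     for lapdata in all_laptimes:
--         if lapdata["result_status"] == "Running":
--             drivers_comp.append(lapdata["driver"])
--         else:
--             drivers_notcomp.append(lapdata["driver"])
--
--     return drivers_comp + drivers_notcomp
-- ===== SOURCE B (Python) =====
-- def extractDrivers(all_laptimes):
--     # Stable sort with a boolean key: Running (False) sorts before non-Running (True),
--     # and stability preserves within-group input order, matching the two-bucket concatenation.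
--     return [d["driver"] for d in sorted(all_laptimes, key=lambda d: d["result_status"] != "Running")]
-- ===== Notes on version B (the rewrite author's own statement) =====
-- stated objective: simpler
-- what changed: Replaces the two-bucket partition loop by a single stable sort on a boolean key (status != 'Running') followed by one comprehension extracting the drivers; stability preserves within-group order so the result is identical.
import Mathlib
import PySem

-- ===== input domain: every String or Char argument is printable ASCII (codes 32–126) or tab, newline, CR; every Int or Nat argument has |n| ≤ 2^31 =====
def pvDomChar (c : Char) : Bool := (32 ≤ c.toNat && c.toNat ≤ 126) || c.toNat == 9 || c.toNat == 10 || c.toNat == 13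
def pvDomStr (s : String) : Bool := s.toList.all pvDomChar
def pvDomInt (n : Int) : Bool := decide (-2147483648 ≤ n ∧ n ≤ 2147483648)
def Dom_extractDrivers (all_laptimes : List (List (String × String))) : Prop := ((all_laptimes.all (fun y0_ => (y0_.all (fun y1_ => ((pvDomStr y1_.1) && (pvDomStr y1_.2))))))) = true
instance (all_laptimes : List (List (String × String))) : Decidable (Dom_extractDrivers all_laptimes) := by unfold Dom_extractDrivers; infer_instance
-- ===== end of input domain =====

-- B replaces A's two-bucket partition loop with a single stable sort on a boolean
-- key followed by one map — simpler, one pass over a sorted list instead of two buckets.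


-- ===== PORT A =====
-- lapdata["k"]: first-match lookup; Pre_ guarantees the key is present, so getD "" never fires inside Pre_
def pvStatus (lapdata : List (String × String)) : String :=
  ((PySem.Dict.mk lapdata).get? "result_status").getD ""

def pvDriver (lapdata : List (String × String)) : String :=
  ((PySem.Dict.mk lapdata).get? "driver").getD ""

def extractDrivers (all_laptimes : List (List (String × String))) : List String :=
  let p := all_laptimes.foldl
    (fun (acc : List String × List String) lapdata =>
      if pvStatus lapdata = "Running" then
        (acc.1 ++ [pvDriver lapdata], acc.2)
      else
        (acc.1, acc.2 ++ [pvDriver lapdata]))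
    ([], [])
  p.1 ++ p.2

-- ===== PORT B =====
def extractDrivers_alt (all_laptimes : List (List (String × String))) : List String :=
  (PySem.List.sorted all_laptimes (fun d => pvStatus d != "Running") false).map pvDriver

-- ===== PRECONDITION & SPEC =====
-- Pre_ excludes exactly the inputs on which Python A raises KeyError: some lapdata
-- missing the "result_status" or "driver" key.
def Pre_extractDrivers (all_laptimes : List (List (String × String))) : Prop :=
  ∀ ld ∈ all_laptimes, "result_status" ∈ ld.map Prod.fst ∧ "driver" ∈ ld.map Prod.fst

instance (all_laptimes : List (List (String × String))) : Decidable (Pre_extractDrivers all_laptimes) := by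
  unfold Pre_extractDrivers; infer_instance

def pvWitness_extractDrivers : (List (List (String × String))) :=
  [[("result_status", "Running"), ("driver", "Alice")],
   [("result_status", "Out"), ("driver", "Bob")]]

def Spec_extractDrivers (all_laptimes : List (List (String × String))) (out : List String) : Prop := out = extractDrivers_alt all_laptimes
instance (all_laptimes : List (List (String × String))) (out : List String) : Decidable (Spec_extractDrivers all_laptimes out) := by unfold Spec_extractDrivers; infer_instance

-- ===== CLAIM (what is proved, stated in full; the proofs are below) =====
def Claim_equal_extractDrivers : Prop := ∀ (all_laptimes : List (List (String × String))), Dom_extractDrivers all_laptimes → Pre_extractDrivers all_laptimes → Spec_extractDrivers all_laptimes (extractDrivers all_laptimes)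

-- ===== LEMMAS AND PROOFS =====

-- insertBy with a boolean key: a false-keyed element goes between the false block and the true block
theorem insertBy_bool_false {α : Type} (key : α → Bool) (x : α) (F T : List α)
    (hF : ∀ y ∈ F, key y = false) (hT : ∀ y ∈ T, key y = true) (hx : key x = false) :
    PySem.List.insertBy (fun a b => decide (key a < key b)) x (F ++ T) = F ++ x :: T := by
  induction F with
  | nil =>
    cases T with
    | nil => simp [PySem.List.insertBy]
    | cons y ys =>
      have hy : key y = true := hT y (by simp)
      simp [PySem.List.insertBy, hx, hy]
  | cons f F' ih =>
    have hf : key f = false := hF f (by simp)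
    have hb : decide (key x < key f) = false := by simp [Bool.lt_iff, hf]
    simp only [List.cons_append, PySem.List.insertBy, hb, if_false]
    rw [ih (fun y hy => hF y (by simp [hy]))]
    simp

-- insertBy with a boolean key: a true-keyed element goes to the very end
theorem insertBy_bool_true {α : Type} (key : α → Bool) (x : α) (ys : List α)
    (hx : key x = true) :
    PySem.List.insertBy (fun a b => decide (key a < key b)) x ys = ys ++ [x] := by
  apply PySem.List.insertBy_of_forall_not_before
  intro y _
  simp [Bool.lt_iff, hx]

-- the insertion-sort fold with a boolean key keeps the accumulator partitioned
theorem foldl_insertBy_bool {α : Type} (key : α → Bool) (xs : List α) :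
    ∀ (F T : List α), (∀ y ∈ F, key y = false) → (∀ y ∈ T, key y = true) →
    xs.foldl (fun acc x => PySem.List.insertBy (fun a b => decide (key a < key b)) x acc) (F ++ T)
      = (F ++ xs.filter (fun x => !key x)) ++ (T ++ xs.filter key) := by
  induction xs with
  | nil => intro F T _ _; simp
  | cons x xs ih =>
    intro F T hF hT
    by_cases hx : key x = true
    · have h1 : PySem.List.insertBy (fun a b => decide (key a < key b)) x (F ++ T)
          = F ++ (T ++ [x]) := by
        rw [insertBy_bool_true key x (F ++ T) hx, List.append_assoc]
      simp only [List.foldl_cons, h1]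
      rw [ih F (T ++ [x]) hF (by intro y hy; rcases List.mem_append.1 hy with h | h
                                 · exact hT y h
                                 · simp at h; simpa [h])]
      simp [List.filter_cons, hx]
    · have hx' : key x = false := by simpa using hx
      have h1 : PySem.List.insertBy (fun a b => decide (key a < key b)) x (F ++ T)
          = (F ++ [x]) ++ T := by
        rw [insertBy_bool_false key x F T hF hT hx']; simp
      simp only [List.foldl_cons, h1]
      rw [ih (F ++ [x]) T (by intro y hy; rcases List.mem_append.1 hy with h | h
                              · exact hF y h
                              · simp at h; simpa [h]) hT]
      simp [List.filter_cons, hx']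

-- Python's stable sort on a boolean key IS the partition: false block first, then true block
theorem sorted_bool_eq_partition {α : Type} (key : α → Bool) (xs : List α) :
    PySem.List.sorted xs key false = xs.filter (fun x => !key x) ++ xs.filter key := by
  have := foldl_insertBy_bool key xs [] [] (by simp) (by simp)
  simpa [PySem.List.sorted] using this

-- A's pair-accumulator loop computes the two filtered, mapped blocks
theorem extractDrivers_foldl (xs : List (List (String × String))) :
    ∀ (c n : List String),
    xs.foldl
      (fun (acc : List String × List String) lapdata =>
        if pvStatus lapdata = "Running" then
          (acc.1 ++ [pvDriver lapdata], acc.2)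
        else
          (acc.1, acc.2 ++ [pvDriver lapdata]))
      (c, n)
      = (c ++ (xs.filter (fun d => pvStatus d = "Running")).map pvDriver,
         n ++ (xs.filter (fun d => ¬ pvStatus d = "Running")).map pvDriver) := by
  induction xs with
  | nil => intro c n; simp
  | cons x xs ih =>
    intro c n
    by_cases hx : pvStatus x = "Running" <;>
      simp [List.foldl_cons, hx, ih, List.filter_cons]

-- ===== VERDICT (by name: the statement is the Claim_ definition above) =====
theorem extractDrivers_spec : Claim_equal_extractDrivers := by
  intro all_laptimes _ _
  unfold Spec_extractDrivers extractDrivers extractDrivers_alt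
  rw [sorted_bool_eq_partition]
  rw [extractDrivers_foldl all_laptimes [] []]
  simp only [List.nil_append, List.map_append]
  congr 1 <;> exact congrArg _ (List.filter_congr (by intro d _; by_cases h : pvStatus d = "Running" <;> simp [h, bne]))
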